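-- pv_equiv track=rewrite | github.com/alfhung/python | assign9/golfDBfunctions - part 7.py | hand_point
-- ===== SOURCE A (Python) =====
-- def hand_point(avg_gross):
--     avg_score = int(avg_gross)
--     # create average score list
--     set_avg_score = list(range(38,60))
--     # create handicap points list
--     set_handicap = [1,2,2,3,4,5,6,6,7,8,9,10,10,\
--                     11,11,12,13,14,15,16,17,17]
--     # find corresponding handicap points
--     if avg_score < 38:
--         handy_point = 0
--     elif avg_score > 59:
--         handy_point = 18
--     else:
--         # set accumulator to use as index
--         value = 0
--         # get value of index from average gross list
--         if avg_score in set_avg_score: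
--             new_list = list(range(38,avg_score+1))
--             for i in new_list:
--                 value = value + 1
--         # modify to correct value of index
--         index_num = value - 1
--         handy_point = set_handicap[index_num]
--     return handy_point
-- ===== SOURCE B (Python) =====
-- def hand_point(avg_gross):
--     avg_score = int(avg_gross)
--     if avg_score < 38:
--         return 0
--     if avg_score > 59:
--         return 18
--     set_handicap = [1,2,2,3,4,5,6,6,7,8,9,10,10,
--                     11,11,12,13,14,15,16,17,17]
--     return set_handicap[avg_score - 38]
-- ===== Notes on version B (the rewrite author's own statement) =====
-- stated objective: simpler
-- what changed: Replaces the membership test and the counting loop over range(38, avg_score+1) with a direct closed-form table index set_handicap[avg_score - 38] and early returns.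
import Mathlib
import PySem

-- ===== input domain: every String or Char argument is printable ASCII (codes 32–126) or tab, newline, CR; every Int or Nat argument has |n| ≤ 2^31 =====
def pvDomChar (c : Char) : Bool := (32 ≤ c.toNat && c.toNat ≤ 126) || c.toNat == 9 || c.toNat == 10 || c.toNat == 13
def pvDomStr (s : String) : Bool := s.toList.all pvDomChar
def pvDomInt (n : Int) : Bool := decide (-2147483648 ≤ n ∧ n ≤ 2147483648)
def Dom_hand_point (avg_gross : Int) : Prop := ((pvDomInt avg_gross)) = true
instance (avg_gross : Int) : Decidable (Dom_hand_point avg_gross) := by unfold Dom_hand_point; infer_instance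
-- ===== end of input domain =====

-- B replaces A's membership test and counting loop by a closed-form table index (simpler decomposition).


-- ===== PORT A =====
-- literal transliteration of A: membership test, counting loop, index = value - 1, table lookup.
-- the final pyGet? is always `some` (index lies in [-1, 21] for a 22-element list), so `.getD 0` is unreachable.
def hand_point (avg_gross : Int) : Int :=
  let avg_score : Int := avg_gross          -- int(avg_gross) on an int is the identity
  let set_avg_score : List Int := PySem.List.pyRange 38 60 1
  let set_handicap : List Int := [1,2,2,3,4,5,6,6,7,8,9,10,10,11,11,12,13,14,15,16,17,17]
  if avg_score < 38 then 0
  else if avg_score > 59 then 18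
  else
    let value : Int :=
      if avg_score ∈ set_avg_score then
        (PySem.List.pyRange 38 (avg_score + 1) 1).foldl (fun v _ => v + 1) 0
      else 0
    let index_num := value - 1
    (PySem.List.pyGet? set_handicap index_num).getD 0

-- ===== PORT B =====
def hand_point_alt (avg_gross : Int) : Int :=
  let avg_score : Int := avg_gross
  if avg_score < 38 then 0
  else if avg_score > 59 then 18
  else
    let set_handicap : List Int := [1,2,2,3,4,5,6,6,7,8,9,10,10,11,11,12,13,14,15,16,17,17]
    (PySem.List.pyGet? set_handicap (avg_score - 38)).getD 0

-- ===== PRECONDITION & SPEC =====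
def Spec_hand_point (avg_gross : Int) (out : Int) : Prop := out = hand_point_alt avg_gross
instance (avg_gross : Int) (out : Int) : Decidable (Spec_hand_point avg_gross out) := by unfold Spec_hand_point; infer_instance

-- ===== CLAIM (what is proved, stated in full; the proofs are below) =====
def Claim_equal_hand_point : Prop := ∀ (avg_gross : Int), Dom_hand_point avg_gross → Spec_hand_point avg_gross (hand_point avg_gross)

-- ===== LEMMAS AND PROOFS =====

-- ===== VERDICT (by name: the statement is the Claim_ definition above) =====
theorem hand_point_spec : Claim_equal_hand_point := by
  intro n _
  unfold Spec_hand_point hand_point hand_point_alt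
  by_cases h1 : n < 38
  · simp [h1]
  · by_cases h2 : n > 59
    · simp [h1, h2]
    · have hlo : 38 ≤ n := le_of_not_gt h1
      have hhi : n ≤ 59 := le_of_not_gt h2
      interval_cases n <;> decide
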